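-- pv_equiv track=rewrite | github.com/wyz1450349230/vmp-calc-extractor | scripts/vmp_collect.py | select_interval
-- ===== SOURCE A (Python) =====
-- from typing import Dict, List, Optional, Sequence, Tuple
--
-- def select_interval(lines: Sequence[str], start: Optional[str], end: Optional[str]) -> List[Tuple[int, str]]:
--     selected: List[Tuple[int, str]] = []
--     active = start is None
--     for idx, line in enumerate(lines, 1):
--         if not active and start is not None and start in line:
--             active = True
--         if active:
--             selected.append((idx, line))
--         if active and end is not None and end in line:
--             break
--     return selected
-- ===== SOURCE B (Python) =====
-- from typing import List, Optional, Sequence, Tuple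
--
-- def select_interval(lines: Sequence[str], start: Optional[str], end: Optional[str]) -> List[Tuple[int, str]]:
--     if start is None:
--         i0 = 0
--     else:
--         i0 = next((i for i, l in enumerate(lines) if start in l), None)
--         if i0 is None:
--             return []
--     out: List[Tuple[int, str]] = []
--     for idx, line in enumerate(lines[i0:], i0 + 1):
--         out.append((idx, line))
--         if end is not None and end in line:
--             break
--     return out
-- ===== Notes on version B (the rewrite author's own statement) =====
-- stated objective: alternative
-- what changed: Replaces the single flag-driven loop with a two-phase find-then-collect: first locate the first line containing start (or return []), then a separate collect loop from that index that stops inclusively at the first line containing end.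
import Mathlib
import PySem

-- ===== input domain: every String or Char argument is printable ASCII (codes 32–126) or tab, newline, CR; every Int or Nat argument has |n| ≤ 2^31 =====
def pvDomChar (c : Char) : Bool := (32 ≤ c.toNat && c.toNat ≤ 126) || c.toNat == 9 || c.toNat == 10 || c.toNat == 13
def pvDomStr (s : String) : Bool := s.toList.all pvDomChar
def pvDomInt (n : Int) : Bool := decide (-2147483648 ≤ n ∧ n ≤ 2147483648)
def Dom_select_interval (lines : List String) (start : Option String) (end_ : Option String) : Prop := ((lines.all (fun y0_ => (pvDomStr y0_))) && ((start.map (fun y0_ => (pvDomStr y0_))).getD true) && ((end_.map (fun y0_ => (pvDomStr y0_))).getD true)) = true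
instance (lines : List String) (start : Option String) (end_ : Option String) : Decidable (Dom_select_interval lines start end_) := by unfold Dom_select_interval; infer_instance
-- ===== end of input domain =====

-- B replaces A's flag-driven single loop by a two-phase find-then-collect decomposition (alternative; same cost).

-- ===== PORT A =====
-- the Python 'x in line' substring test for an Optional pattern (none → False, as in A's 'start is not None and start in line')
def pvHas (pat : Option String) (line : String) : Bool :=
  match pat with
  | none => false
  | some p => PySem.Str.isIn p line

-- A's loop: state = (1-based idx, active flag); append/break transliterated as structural recursion
def selLoopA (start : Option String) (end_ : Option String) : List String → Int → Bool → List (Int × String)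
  | [], _, _ => []
  | line :: rest, idx, active =>
    let active' := if !active && pvHas start line then true else active
    if active' then
      if pvHas end_ line then [(idx, line)]
      else (idx, line) :: selLoopA start end_ rest (idx + 1) active'
    else selLoopA start end_ rest (idx + 1) active'

def select_interval (lines : List String) (start : Option String) (end_ : Option String) : List (Int × String) :=
  selLoopA start end_ lines 1 start.isNone

-- ===== PORT B =====
-- B's collect phase: take lines pairing 1-based indices, stop inclusively after a line containing end
def collectB (end_ : Option String) : List String → Int → List (Int × String)
  | [], _ => []
  | line :: rest, idx =>
    (idx, line) :: (if pvHas end_ line then [] else collectB end_ rest (idx + 1))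

def select_interval_alt (lines : List String) (start : Option String) (end_ : Option String) : List (Int × String) :=
  match start with
  | none => collectB end_ lines 1
  | some s =>
    match lines.findIdx? (fun l => PySem.Str.isIn s l) with
    | none => []
    | some i => collectB end_ (lines.drop i) ((i : Int) + 1)

-- ===== PRECONDITION & SPEC =====
def Spec_select_interval (lines : List String) (start : Option String) (end_ : Option String) (out : List (Int × String)) : Prop := out = select_interval_alt lines start end_
instance (lines : List String) (start : Option String) (end_ : Option String) (out : List (Int × String)) : Decidable (Spec_select_interval lines start end_ out) := by unfold Spec_select_interval; infer_instance

-- ===== CLAIM (what is proved, stated in full; the proofs are below) =====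
def Claim_equal_select_interval : Prop := ∀ (lines : List String) (start : Option String) (end_ : Option String), Dom_select_interval lines start end_ → Spec_select_interval lines start end_ (select_interval lines start end_)

-- ===== LEMMAS AND PROOFS =====

theorem ite_sing_cons {α : Type} (c : Prop) [Decidable c] (a : α) (xs : List α) :
    (if c then [a] else a :: xs) = a :: (if c then [] else xs) := by split <;> rfl

-- once active, A's loop is exactly B's collect phase
theorem selLoopA_active (start end_ : Option String) :
    ∀ (ls : List String) (idx : Int), selLoopA start end_ ls idx true = collectB end_ ls idx := by
  intro ls
  induction ls with
  | nil => intro idx; rfl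
  | cons line rest ih =>
    intro idx
    simp only [selLoopA, collectB, Bool.not_true, Bool.false_and, ite_self, if_true, ih,
      ite_sing_cons]

-- before activation (start = some s), A's loop = find the first matching line, then collect from it
theorem selLoopA_inactive (s : String) (end_ : Option String) :
    ∀ (ls : List String) (idx : Int),
      selLoopA (some s) end_ ls idx false =
        match ls.findIdx? (fun l => PySem.Str.isIn s l) with
        | none => []
        | some i => collectB end_ (ls.drop i) (idx + (i : Int)) := by
  intro ls
  induction ls with
  | nil => intro idx; rfl
  | cons line rest ih =>
    intro idx
    by_cases h : pvHas (some s) line = true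
    · have hs : PySem.Str.isIn s line = true := h
      simp only [selLoopA, Bool.not_false, Bool.true_and, h, if_true, List.findIdx?_cons, hs, selLoopA_active, collectB, ite_sing_cons, List.drop_zero,
        Nat.cast_zero, add_zero]
    · have h0 : pvHas (some s) line = false := by simpa using h
      have hs : PySem.Str.isIn s line = false := h0
      simp only [selLoopA, Bool.not_false, Bool.true_and, h0, Bool.false_eq_true, if_false, ih,
        List.findIdx?_cons, hs]
      cases hf : rest.findIdx? (fun l => PySem.Str.isIn s l) with
      | none => simp
      | some i =>
        simp only [Option.map_some]
        congr 1
        omega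

-- ===== VERDICT (by name: the statement is the Claim_ definition above) =====
theorem select_interval_spec : Claim_equal_select_interval := by
  intro lines start end_ _
  unfold Spec_select_interval select_interval select_interval_alt
  cases start with
  | none => simpa using selLoopA_active none end_ lines 1
  | some s =>
    rw [show (some s : Option String).isNone = false from rfl, selLoopA_inactive]
    cases hf : lines.findIdx? (fun l => PySem.Str.isIn s l) with
    | none => simp only [hf]
    | some i => simp only [hf]; rw [Int.add_comm]
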